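-- pv_equiv track=rewrite | github.com/UNO-Babb/homework-2-LukeSwier | BusSchedule.py | firsttwotimes
-- ===== SOURCE A (Python) =====
-- def firsttwotimes(data):
--   nextbus = None
--   followingbus = None
--   for d in data:
--     if nextbus is None:
--       nextbus = d
--       nextbus
--     elif followingbus is None:
--       followingbus = d
--       followingbus
--       break
--   return nextbus,followingbus
-- ===== SOURCE B (Python) =====
-- def firsttwotimes(data):
--   head = data[:2]
--   return (head[0] if len(head) > 0 else None, head[1] if len(head) > 1 else None)
-- ===== Notes on version B (the rewrite author's own statement) =====
-- stated objective: simpler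
-- what changed: Replaces the stateful two-sentinel loop with a loop-free slice data[:2] and direct indexing.
import Mathlib
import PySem

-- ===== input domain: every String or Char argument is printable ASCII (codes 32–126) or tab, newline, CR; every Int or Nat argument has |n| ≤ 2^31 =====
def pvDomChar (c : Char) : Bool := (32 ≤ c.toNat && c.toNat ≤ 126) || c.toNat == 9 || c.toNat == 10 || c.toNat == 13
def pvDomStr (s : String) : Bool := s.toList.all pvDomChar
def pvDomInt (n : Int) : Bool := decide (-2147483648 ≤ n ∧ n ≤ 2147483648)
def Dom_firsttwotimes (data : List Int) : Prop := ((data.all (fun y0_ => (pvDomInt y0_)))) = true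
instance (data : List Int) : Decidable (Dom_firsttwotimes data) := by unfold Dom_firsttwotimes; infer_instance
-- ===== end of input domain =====

-- B replaces A's stateful two-sentinel loop by a loop-free slice-and-index; objective: simpler.

-- ===== PORT A =====
-- the for-loop over data carrying (nextbus, followingbus); the elif branch breaks by returning
def firsttwotimesLoop : List Int → Option Int → Option Int → Option Int × Option Int
  | [], nextbus, followingbus => (nextbus, followingbus)
  | d :: rest, nextbus, followingbus =>
      if nextbus = none then firsttwotimesLoop rest (some d) followingbus
      else if followingbus = none then (nextbus, some d)   -- break
      else firsttwotimesLoop rest nextbus followingbus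

def firsttwotimes (data : List Int) : Option Int × Option Int :=
  firsttwotimesLoop data none none

-- ===== PORT B =====
def firsttwotimes_alt (data : List Int) : Option Int × Option Int :=
  let head := PySem.List.slice data none (some 2)
  ((if 0 < head.length then PySem.List.pyGet? head 0 |>.getD 0 |> some else none),
   (if 1 < head.length then PySem.List.pyGet? head 1 |>.getD 0 |> some else none))

-- ===== PRECONDITION & SPEC =====
def Spec_firsttwotimes (data : List Int) (out : Option Int × Option Int) : Prop := out = firsttwotimes_alt data
instance (data : List Int) (out : Option Int × Option Int) : Decidable (Spec_firsttwotimes data out) := by unfold Spec_firsttwotimes; infer_instance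

-- ===== CLAIM (what is proved, stated in full; the proofs are below) =====
def Claim_equal_firsttwotimes : Prop := ∀ (data : List Int), Dom_firsttwotimes data → Spec_firsttwotimes data (firsttwotimes data)

-- ===== LEMMAS AND PROOFS =====

-- ===== VERDICT (by name: the statement is the Claim_ definition above) =====
theorem firsttwotimes_spec : Claim_equal_firsttwotimes := by
  intro data _
  unfold Spec_firsttwotimes firsttwotimes firsttwotimes_alt
  match data with
  | [] => rfl
  | [a] => rfl
  | a :: b :: rest =>
      have h2 : PySem.List.slice (a :: b :: rest) none (some 2) = [a, b] := by
        rw [show (2:Int) = ((2:Nat):Int) from rfl, PySem.List.slice_to_natCast]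
        simp
      simp [firsttwotimesLoop, h2, PySem.List.pyGet?, PySem.List.pyIdx?]
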